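-- pv_equiv track=rewrite | github.com/wxdangel-ship-it/Highway_Topo_Poc | src/highway_topo_poc/modules/t00_synth_data/synth.py | _gpkg_order_by
-- ===== SOURCE A (Python) =====
-- def _gpkg_order_by(columns: list[str]) -> str:
--     for c in [
--         "frame_id",
--         "frame",
--         "idx",
--         "index",
--         "seq",
--         "sequence",
--         "t",
--         "time",
--         "timestamp",
--         "stamp",
--     ]:
--         if c in columns:
--             return f"ORDER BY {c}"
--     return "ORDER BY rowid"
-- ===== SOURCE B (Python) =====
-- _RANK = {name: i for i, name in enumerate([
--     "frame_id", "frame", "idx", "index", "seq", "sequence",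
--     "t", "time", "timestamp", "stamp",
-- ])}
--
--
-- def _gpkg_order_by(columns: list[str]) -> str:
--     best_rank = None
--     best_name = None
--     for c in columns:
--         r = _RANK.get(c)
--         if r is not None and (best_rank is None or r < best_rank):
--             best_rank = r
--             best_name = c
--     if best_name is None:
--         return "ORDER BY rowid"
--     return f"ORDER BY {best_name}"
-- ===== Notes on version B (the rewrite author's own statement) =====
-- stated objective: alternative
-- what changed: Instead of scanning `columns` once per priority name (up to 10 membership scans of the input), B builds a name-to-rank dict once and makes a single pass over `columns`, keeping the minimal-rank match.
import Mathlib
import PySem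

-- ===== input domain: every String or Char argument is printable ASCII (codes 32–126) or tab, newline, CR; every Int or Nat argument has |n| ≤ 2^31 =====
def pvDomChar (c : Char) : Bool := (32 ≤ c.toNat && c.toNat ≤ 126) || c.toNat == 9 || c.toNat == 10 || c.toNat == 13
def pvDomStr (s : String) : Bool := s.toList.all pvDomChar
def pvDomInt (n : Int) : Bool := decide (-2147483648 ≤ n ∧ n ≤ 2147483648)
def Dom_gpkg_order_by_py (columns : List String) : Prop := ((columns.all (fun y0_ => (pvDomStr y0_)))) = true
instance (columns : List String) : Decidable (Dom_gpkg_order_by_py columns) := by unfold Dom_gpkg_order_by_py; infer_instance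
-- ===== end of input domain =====

-- B builds a name→rank dict once and makes one pass over `columns` keeping the
-- minimal-rank match; A scans `columns` once per priority name. Same results.

def pvPrio : List String :=
  ["frame_id", "frame", "idx", "index", "seq", "sequence",
   "t", "time", "timestamp", "stamp"]

-- ===== PORT A =====
-- the for-loop over the literal priority list with an early return
def pvAGo (cands : List String) (columns : List String) : String :=
  match cands with
  | [] => "ORDER BY rowid"
  | c :: rest => if columns.contains c then "ORDER BY " ++ c else pvAGo rest columns

def gpkg_order_by_py (columns : List String) : String :=
  pvAGo pvPrio columns

-- ===== PORT B =====
-- the dict {name: i for i, name in enumerate(...)} as an association list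
def pvRank : List (String × Nat) := pvPrio.zipIdx

-- one iteration of B's loop: update (best_rank, best_name)
def pvBStep (best : Option (Nat × String)) (c : String) : Option (Nat × String) :=
  match pvRank.lookup c with
  | none => best
  | some r =>
    match best with
    | none => some (r, c)
    | some (br, bn) => if r < br then some (r, c) else some (br, bn)

def gpkg_order_by_py_alt (columns : List String) : String :=
  match columns.foldl pvBStep none with
  | none => "ORDER BY rowid"
  | some (_, n) => "ORDER BY " ++ n

-- ===== PRECONDITION & SPEC =====
def Spec_gpkg_order_by_py (columns : List String) (out : String) : Prop := out = gpkg_order_by_py_alt columns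
instance (columns : List String) (out : String) : Decidable (Spec_gpkg_order_by_py columns out) := by unfold Spec_gpkg_order_by_py; infer_instance

-- ===== CLAIM (what is proved, stated in full; the proofs are below) =====
def Claim_equal_gpkg_order_by_py : Prop := ∀ (columns : List String), Dom_gpkg_order_by_py columns → Spec_gpkg_order_by_py columns (gpkg_order_by_py columns)

-- ===== LEMMAS AND PROOFS =====

-- a lookup hit belongs to the association list
theorem pv_lookup_mem {l : List (String × Nat)} {c : String} {r : Nat}
    (h : l.lookup c = some r) : (c, r) ∈ l := by
  induction l with
  | nil => simp [List.lookup] at h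
  | cons p l ih =>
    obtain ⟨k, v⟩ := p
    rw [List.lookup] at h
    cases hk : (c == k) with
    | true =>
      rw [hk] at h
      obtain rfl : c = k := beq_iff_eq.mp hk
      obtain rfl : v = r := Option.some.inj h
      exact List.mem_cons_self
    | false =>
      rw [hk] at h
      exact List.mem_cons_of_mem _ (ih h)

-- invariant of B's accumulator over the prefix `seen` scanned so far:
-- a found best is a ranked member of `seen` with minimal rank; `none` means
-- no member of `seen` is ranked
def pvGood (seen : List String) (o : Option (Nat × String)) : Prop :=
  match o with
  | none => ∀ c ∈ seen, pvRank.lookup c = none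
  | some (r, n) =>
      pvRank.lookup n = some r ∧ n ∈ seen ∧
      ∀ c ∈ seen, ∀ r', pvRank.lookup c = some r' → r ≤ r'

theorem pv_good_step {seen : List String} {acc : Option (Nat × String)} (c : String)
    (h : pvGood seen acc) : pvGood (seen ++ [c]) (pvBStep acc c) := by
  cases hl : pvRank.lookup c with
  | none =>
    have hstep : pvBStep acc c = acc := by simp [pvBStep, hl]
    rw [hstep]
    cases acc with
    | none =>
      simp only [pvGood] at h ⊢
      intro x hx
      rcases List.mem_append.mp hx with hx | hx
      · exact h x hx
      · simp only [List.mem_singleton] at hx; subst hx; exact hl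
    | some p =>
      obtain ⟨r, n⟩ := p
      simp only [pvGood] at h ⊢
      obtain ⟨h1, h2, h3⟩ := h
      refine ⟨h1, List.mem_append_left _ h2, ?_⟩
      intro x hx r' hr'
      rcases List.mem_append.mp hx with hx | hx
      · exact h3 x hx r' hr'
      · simp only [List.mem_singleton] at hx; subst hx
        rw [hl] at hr'; cases hr'
  | some r =>
    cases acc with
    | none =>
      have hstep : pvBStep none c = some (r, c) := by simp [pvBStep, hl]
      rw [hstep]
      simp only [pvGood] at h ⊢
      refine ⟨hl, List.mem_append_right _ (by simp), ?_⟩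
      intro x hx r' hr'
      rcases List.mem_append.mp hx with hx | hx
      · rw [h x hx] at hr'; cases hr'
      · simp only [List.mem_singleton] at hx; subst hx
        rw [hl] at hr'
        injection hr' with hrr
        omega
    | some p =>
      obtain ⟨br, bn⟩ := p
      simp only [pvGood] at h
      obtain ⟨h1, h2, h3⟩ := h
      by_cases hlt : r < br
      · have hstep : pvBStep (some (br, bn)) c = some (r, c) := by
          simp [pvBStep, hl, hlt]
        rw [hstep]
        simp only [pvGood]
        refine ⟨hl, List.mem_append_right _ (by simp), ?_⟩
        intro x hx r' hr'
        rcases List.mem_append.mp hx with hx | hx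
        · have := h3 x hx r' hr'; omega
        · simp only [List.mem_singleton] at hx; subst hx
          rw [hl] at hr'
          injection hr' with hrr
          omega
      · have hstep : pvBStep (some (br, bn)) c = some (br, bn) := by
          simp [pvBStep, hl, hlt]
        rw [hstep]
        simp only [pvGood]
        refine ⟨h1, List.mem_append_left _ h2, ?_⟩
        intro x hx r' hr'
        rcases List.mem_append.mp hx with hx | hx
        · exact h3 x hx r' hr'
        · simp only [List.mem_singleton] at hx; subst hx
          rw [hl] at hr'
          injection hr' with hrr
          omega

theorem pv_good_foldl : ∀ (cs seen : List String) (acc : Option (Nat × String)),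
    pvGood seen acc → pvGood (seen ++ cs) (cs.foldl pvBStep acc) := by
  intro cs
  induction cs with
  | nil => intro seen acc h; simpa using h
  | cons c cs ih =>
    intro seen acc h
    have h3 := ih (seen ++ [c]) (pvBStep acc c) (pv_good_step c h)
    simpa [List.append_assoc] using h3

theorem pv_good_B0 (cs : List String) : pvGood cs (cs.foldl pvBStep none) := by
  simpa using pv_good_foldl cs [] none (by intro c hc; cases hc)

-- A's loop steps
theorem pvAGo_pos {cs : List String} {c : String} (rest : List String)
    (h : c ∈ cs) : pvAGo (c :: rest) cs = "ORDER BY " ++ c := by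
  simp [pvAGo, h]

theorem pvAGo_neg {cs : List String} {c : String} (rest : List String)
    (h : c ∉ cs) : pvAGo (c :: rest) cs = pvAGo rest cs := by
  simp [pvAGo, h]

-- ===== VERDICT (by name: the statement is the Claim_ definition above) =====
theorem gpkg_order_by_py_spec : Claim_equal_gpkg_order_by_py := by
  intro cs _
  unfold Spec_gpkg_order_by_py gpkg_order_by_py gpkg_order_by_py_alt
  have hg := pv_good_B0 cs
  cases hB : cs.foldl pvBStep none with
  | none =>
    rw [hB] at hg
    simp only [pvGood] at hg
    have hnot : ∀ (m : String) (i : Nat), pvRank.lookup m = some i → m ∉ cs := by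
      intro m i hlook hm
      rw [hg m hm] at hlook
      cases hlook
    show pvAGo ["frame_id", "frame", "idx", "index", "seq", "sequence", "t", "time", "timestamp", "stamp"] cs = _
    rw [pvAGo_neg _ (hnot "frame_id" 0 rfl),
        pvAGo_neg _ (hnot "frame" 1 rfl),
        pvAGo_neg _ (hnot "idx" 2 rfl),
        pvAGo_neg _ (hnot "index" 3 rfl),
        pvAGo_neg _ (hnot "seq" 4 rfl),
        pvAGo_neg _ (hnot "sequence" 5 rfl),
        pvAGo_neg _ (hnot "t" 6 rfl),
        pvAGo_neg _ (hnot "time" 7 rfl),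
        pvAGo_neg _ (hnot "timestamp" 8 rfl),
        pvAGo_neg _ (hnot "stamp" 9 rfl)]
    rfl
  | some p =>
    obtain ⟨r, n⟩ := p
    rw [hB] at hg
    simp only [pvGood] at hg
    obtain ⟨hn, hmem, hmin⟩ := hg
    have hnot : ∀ (m : String) (i : Nat), pvRank.lookup m = some i → i < r → m ∉ cs := by
      intro m i hlook hi hm
      have := hmin m hm i hlook
      omega
    have hmemRank : (n, r) ∈ pvRank := pv_lookup_mem hn
    have hR : pvRank = [("frame_id", 0), ("frame", 1), ("idx", 2), ("index", 3), ("seq", 4), ("sequence", 5), ("t", 6), ("time", 7), ("timestamp", 8), ("stamp", 9)] := rfl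
    rw [hR] at hmemRank
    show pvAGo ["frame_id", "frame", "idx", "index", "seq", "sequence", "t", "time", "timestamp", "stamp"] cs = _
    simp only [List.mem_cons, List.not_mem_nil, or_false] at hmemRank
    rcases hmemRank with h|h|h|h|h|h|h|h|h|h
    · obtain ⟨rfl, rfl⟩ := Prod.mk.injEq .. ▸ h
      rw [pvAGo_pos _ hmem]
    · obtain ⟨rfl, rfl⟩ := Prod.mk.injEq .. ▸ h
      rw [pvAGo_neg _ (hnot "frame_id" 0 rfl (by omega)), pvAGo_pos _ hmem]
    · obtain ⟨rfl, rfl⟩ := Prod.mk.injEq .. ▸ h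
      rw [pvAGo_neg _ (hnot "frame_id" 0 rfl (by omega)), pvAGo_neg _ (hnot "frame" 1 rfl (by omega)), pvAGo_pos _ hmem]
    · obtain ⟨rfl, rfl⟩ := Prod.mk.injEq .. ▸ h
      rw [pvAGo_neg _ (hnot "frame_id" 0 rfl (by omega)), pvAGo_neg _ (hnot "frame" 1 rfl (by omega)), pvAGo_neg _ (hnot "idx" 2 rfl (by omega)), pvAGo_pos _ hmem]
    · obtain ⟨rfl, rfl⟩ := Prod.mk.injEq .. ▸ h
      rw [pvAGo_neg _ (hnot "frame_id" 0 rfl (by omega)), pvAGo_neg _ (hnot "frame" 1 rfl (by omega)), pvAGo_neg _ (hnot "idx" 2 rfl (by omega)), pvAGo_neg _ (hnot "index" 3 rfl (by omega)), pvAGo_pos _ hmem]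
    · obtain ⟨rfl, rfl⟩ := Prod.mk.injEq .. ▸ h
      rw [pvAGo_neg _ (hnot "frame_id" 0 rfl (by omega)), pvAGo_neg _ (hnot "frame" 1 rfl (by omega)), pvAGo_neg _ (hnot "idx" 2 rfl (by omega)), pvAGo_neg _ (hnot "index" 3 rfl (by omega)), pvAGo_neg _ (hnot "seq" 4 rfl (by omega)), pvAGo_pos _ hmem]
    · obtain ⟨rfl, rfl⟩ := Prod.mk.injEq .. ▸ h
      rw [pvAGo_neg _ (hnot "frame_id" 0 rfl (by omega)), pvAGo_neg _ (hnot "frame" 1 rfl (by omega)), pvAGo_neg _ (hnot "idx" 2 rfl (by omega)), pvAGo_neg _ (hnot "index" 3 rfl (by omega)), pvAGo_neg _ (hnot "seq" 4 rfl (by omega)), pvAGo_neg _ (hnot "sequence" 5 rfl (by omega)), pvAGo_pos _ hmem]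
    · obtain ⟨rfl, rfl⟩ := Prod.mk.injEq .. ▸ h
      rw [pvAGo_neg _ (hnot "frame_id" 0 rfl (by omega)), pvAGo_neg _ (hnot "frame" 1 rfl (by omega)), pvAGo_neg _ (hnot "idx" 2 rfl (by omega)), pvAGo_neg _ (hnot "index" 3 rfl (by omega)), pvAGo_neg _ (hnot "seq" 4 rfl (by omega)), pvAGo_neg _ (hnot "sequence" 5 rfl (by omega)), pvAGo_neg _ (hnot "t" 6 rfl (by omega)), pvAGo_pos _ hmem]
    · obtain ⟨rfl, rfl⟩ := Prod.mk.injEq .. ▸ h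
      rw [pvAGo_neg _ (hnot "frame_id" 0 rfl (by omega)), pvAGo_neg _ (hnot "frame" 1 rfl (by omega)), pvAGo_neg _ (hnot "idx" 2 rfl (by omega)), pvAGo_neg _ (hnot "index" 3 rfl (by omega)), pvAGo_neg _ (hnot "seq" 4 rfl (by omega)), pvAGo_neg _ (hnot "sequence" 5 rfl (by omega)), pvAGo_neg _ (hnot "t" 6 rfl (by omega)), pvAGo_neg _ (hnot "time" 7 rfl (by omega)), pvAGo_pos _ hmem]
    · obtain ⟨rfl, rfl⟩ := Prod.mk.injEq .. ▸ h
      rw [pvAGo_neg _ (hnot "frame_id" 0 rfl (by omega)), pvAGo_neg _ (hnot "frame" 1 rfl (by omega)), pvAGo_neg _ (hnot "idx" 2 rfl (by omega)), pvAGo_neg _ (hnot "index" 3 rfl (by omega)), pvAGo_neg _ (hnot "seq" 4 rfl (by omega)), pvAGo_neg _ (hnot "sequence" 5 rfl (by omega)), pvAGo_neg _ (hnot "t" 6 rfl (by omega)), pvAGo_neg _ (hnot "time" 7 rfl (by omega)), pvAGo_neg _ (hnot "timestamp" 8 rfl (by omega)), pvAGo_pos _ hmem]
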